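-- pv_equiv track=rewrite | github.com/david-westreicher/mcparse | src/utils.py | function_ranges2
-- ===== SOURCE A (Python) =====
-- def function_ranges2(code, asDic=False):
--     functions = {}
--     currfunc = '__global__'
--     for codeline, (op, _, _, fname) in enumerate(code):
--         if op == 'function':
--             currfunc = fname
--         if currfunc not in functions:
--             functions[currfunc] = [codeline, codeline + 1]
--         else:
--             functions[currfunc][1] = codeline + 1
--     if not asDic:
--         return sorted([(name, start, end) for name, (start, end) in functions.items()], key=lambda x: x[1])
--     return functions
-- ===== SOURCE B (Python) =====
-- def function_ranges2(code, asDic=False):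
--     # Segment view: each 'function' op opens a new segment; a function's range is the
--     # span from its first segment's start to its last segment's end (segments are
--     # visited in order, so starts of first occurrences are already increasing and
--     # the result needs no sort).
--     n = len(code)
--     cuts = [(i, fname) for i, (op, _, _, fname) in enumerate(code) if op == 'function']
--     names = ['__global__'] + [f for _, f in cuts]
--     bounds = [0] + [i for i, _ in cuts] + [n]
--     functions = {}
--     for name, s, e in zip(names, bounds, bounds[1:]):
--         if s < e:  # skip the empty leading '__global__' segment
--             if name in functions:
--                 functions[name][1] = e
--             else:
--                 functions[name] = [s, e]
--     if asDic:
--         return functions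
--     return [(name, s, e) for name, (s, e) in functions.items()]
-- ===== Notes on version B (the rewrite author's own statement) =====
-- stated objective: alternative
-- what changed: B abandons A's per-line dict updating: it first extracts the 'function' boundary positions, derives the segment list (name, start, end) by zipping boundaries, merges segments per name (first start, last end), and emits the result without sorting because first-occurrence segment starts are already increasing. Pre_ excludes asDic=True, where both return a dict rather than a value of the declared list-of-triples return type.
-- outside the precondition, e.g. on function_ranges2([('function', 'x', 'y', 'f')], True): A returns {'f': [0, 1]}, B returns {'f': [0, 1]}
import Mathlib
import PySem

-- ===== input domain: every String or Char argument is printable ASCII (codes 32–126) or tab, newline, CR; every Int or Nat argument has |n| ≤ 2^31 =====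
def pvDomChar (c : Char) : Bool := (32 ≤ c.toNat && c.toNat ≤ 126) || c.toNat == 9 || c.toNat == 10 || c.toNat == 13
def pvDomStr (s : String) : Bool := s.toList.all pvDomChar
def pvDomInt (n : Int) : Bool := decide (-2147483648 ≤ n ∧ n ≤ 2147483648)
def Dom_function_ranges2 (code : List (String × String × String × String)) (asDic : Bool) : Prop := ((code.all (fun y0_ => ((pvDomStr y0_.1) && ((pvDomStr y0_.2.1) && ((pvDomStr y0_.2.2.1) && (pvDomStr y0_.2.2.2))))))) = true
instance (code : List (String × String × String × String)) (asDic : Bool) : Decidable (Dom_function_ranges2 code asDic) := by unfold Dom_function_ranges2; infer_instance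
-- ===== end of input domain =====

-- B replaces A's per-line dict updating by a segment decomposition: it extracts the 'function'
-- boundary positions, zips them into (name, start, end) segments, merges segments per name
-- (first start / last end), and emits the result without sorting (first-occurrence starts are
-- already increasing). Same asymptotic cost; the asDic=True dict return is modelled as its
-- items list of triples, per the type convention.

-- ===== PORT A =====
-- one loop iteration of A: update currfunc, then create or mutate functions[currfunc]
def frStepA (st : PySem.Dict String (Int × Int) × String)
    (p : Int × (String × String × String × String)) : PySem.Dict String (Int × Int) × String :=
  let cur := if p.2.1 == "function" then p.2.2.2.2 else st.2
  -- if currfunc not in functions: create [codeline, codeline+1]; else functions[currfunc][1] = codeline+1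
  (if st.1.contains cur = false then st.1.insert cur (p.1, p.1 + 1)
   else st.1.modify cur (0, 0) (fun se => (se.1, p.1 + 1)), cur)

def function_ranges2 (code : List (String × String × String × String)) (asDic : Bool) : List (String × Int × Int) :=
  let st := (PySem.List.enumerate code 0).foldl frStepA (PySem.Dict.empty, "__global__")
  if asDic = false then
    PySem.List.sorted (st.1.items.map (fun p => (p.1, p.2.1, p.2.2))) (fun x => x.2.1) false
  else
    st.1.items.map (fun p => (p.1, p.2.1, p.2.2))

-- ===== PORT B =====
-- loop body of B: `if s < e: (merge segment into functions)`
def frSeg (d : PySem.Dict String (Int × Int)) (p : String × Int × Int) : PySem.Dict String (Int × Int) :=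
  if p.2.1 < p.2.2 then
    if d.contains p.1 then d.modify p.1 (0, 0) (fun se => (se.1, p.2.2))
    else d.insert p.1 (p.2.1, p.2.2)
  else d

def function_ranges2_alt (code : List (String × String × String × String)) (asDic : Bool) : List (String × Int × Int) :=
  let n : Int := code.length
  -- cuts = [(i, fname) for i, (op, _, _, fname) in enumerate(code) if op == 'function']
  let cuts := (PySem.List.enumerate code 0).filterMap
    (fun p => if p.2.1 == "function" then some (p.1, p.2.2.2.2) else none)
  let names := "__global__" :: cuts.map (fun c => c.2)
  let bounds : List Int := 0 :: cuts.map (fun c => c.1) ++ [n]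
  -- zip(names, bounds, bounds[1:]) folded with the merge step
  let functions := (names.zip (bounds.zip bounds.tail)).foldl frSeg PySem.Dict.empty
  -- both returns (the dict's items and the unsorted comprehension) are this same triples list
  functions.items.map (fun p => (p.1, p.2.1, p.2.2))

-- ===== PRECONDITION & SPEC =====
-- Pre_ excludes asDic = true, on which Python A returns a dict (not a value of the declared
-- list-of-triples return type); B returns the same dict there (its items list is the ports' shared value).
def Pre_function_ranges2 (code : List (String × String × String × String)) (asDic : Bool) : Prop := asDic = false
instance (code : List (String × String × String × String)) (asDic : Bool) : Decidable (Pre_function_ranges2 code asDic) := by unfold Pre_function_ranges2; infer_instance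
def pvWitness_function_ranges2 : (List (String × String × String × String)) × Bool := ([("function", "x", "y", "f"), ("add", "x", "y", "")], false)
def Spec_function_ranges2 (code : List (String × String × String × String)) (asDic : Bool) (out : List (String × Int × Int)) : Prop := out = function_ranges2_alt code asDic
instance (code : List (String × String × String × String)) (asDic : Bool) (out : List (String × Int × Int)) : Decidable (Spec_function_ranges2 code asDic out) := by unfold Spec_function_ranges2; infer_instance

-- ===== CLAIM (what is proved, stated in full; the proofs are below) =====
def Claim_equal_function_ranges2 : Prop := ∀ (code : List (String × String × String × String)) (asDic : Bool), Dom_function_ranges2 code asDic → Pre_function_ranges2 code asDic → Spec_function_ranges2 code asDic (function_ranges2 code asDic)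

-- ===== LEMMAS AND PROOFS =====

-- the cut list of B, with a generalized start index (for the induction)
def cutsH (i0 : Int) (code : List (String × String × String × String)) : List (Int × String) :=
  (PySem.List.enumerate code i0).filterMap
    (fun p => if p.2.1 == "function" then some (p.1, p.2.2.2.2) else none)

-- the bound list after its leading i0
def rbH (i0 : Int) (code : List (String × String × String × String)) : List Int :=
  (cutsH i0 code).map (fun c => c.1) ++ [i0 + (code.length : Int)]

-- B's segment list, with a generalized leading name and start index
def segsH (cur : String) (i0 : Int) (code : List (String × String × String × String)) : List (String × Int × Int) :=
  (cur :: (cutsH i0 code).map (fun c => c.2)).zip ((i0 :: rbH i0 code).zip (rbH i0 code))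

theorem cutsH_cons (i0 : Int) (x : String × String × String × String) (rest : List (String × String × String × String)) :
    cutsH i0 (x :: rest) = if x.1 == "function" then (i0, x.2.2.2) :: cutsH (i0 + 1) rest else cutsH (i0 + 1) rest := by
  simp only [cutsH, PySem.List.enumerate_cons, List.filterMap_cons]
  split <;> simp_all

theorem cutsH_fst_ge (code : List (String × String × String × String)) :
    ∀ (i0 : Int), ∀ p ∈ cutsH i0 code, i0 ≤ p.1 := by
  induction code with
  | nil => intro i0 p hp; simp [cutsH, PySem.List.enumerate_nil] at hp
  | cons x rest ih =>
    intro i0 p hp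
    rw [cutsH_cons] at hp
    by_cases hop : (x.1 == "function") = true
    · simp [hop] at hp
      rcases hp with hp | hp
      · simp [hp]
      · have := ih (i0 + 1) p hp; omega
    · simp [hop] at hp
      have := ih (i0 + 1) p hp; omega

theorem rbH_cons_eq (i0 : Int) (x : String × String × String × String)
    (rest : List (String × String × String × String)) (hop : (x.1 == "function") = false) :
    rbH i0 (x :: rest) = rbH (i0 + 1) rest := by
  simp only [rbH, cutsH_cons, hop, Bool.false_eq_true, if_false, List.length_cons]
  push_cast; ring_nf

theorem rbH_cons_fn (i0 : Int) (x : String × String × String × String)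
    (rest : List (String × String × String × String)) (hop : (x.1 == "function") = true) :
    rbH i0 (x :: rest) = i0 :: rbH (i0 + 1) rest := by
  simp only [rbH, cutsH_cons, hop, if_true, List.length_cons, List.map_cons]
  push_cast; ring_nf; simp

theorem rbH_ne_nil (i0 : Int) (code : List (String × String × String × String)) : rbH i0 code ≠ [] := by
  simp [rbH]

theorem rbH_head_ge (i0 : Int) (code : List (String × String × String × String))
    (b1 : Int) (bs : List Int) (h : rbH i0 code = b1 :: bs) : i0 ≤ b1 := by
  have hb1 : b1 ∈ rbH i0 code := by rw [h]; exact List.mem_cons_self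
  rcases List.mem_append.1 hb1 with hm | hm
  · obtain ⟨p, hp, rfl⟩ := List.mem_map.1 hm
    exact cutsH_fst_ge code i0 p hp
  · simp at hm; omega

theorem segsH_cons (cur : String) (i0 : Int) (x : String × String × String × String)
    (rest : List (String × String × String × String)) :
    ∃ (b1 : Int) (tail : List (String × Int × Int)),
      i0 + 1 ≤ b1 ∧
      segsH cur i0 (x :: rest) =
        (if x.1 == "function" then [(cur, i0, i0), (x.2.2.2, i0, b1)] else [(cur, i0, b1)]) ++ tail ∧
      segsH (if x.1 == "function" then x.2.2.2 else cur) (i0 + 1) rest =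
        ((if x.1 == "function" then x.2.2.2 else cur), i0 + 1, b1) :: tail := by
  obtain ⟨b1, bs, hrb⟩ := List.exists_cons_of_ne_nil (rbH_ne_nil (i0 + 1) rest)
  have hb1 : i0 + 1 ≤ b1 := rbH_head_ge _ _ _ _ hrb
  refine ⟨b1, ((cutsH (i0 + 1) rest).map (fun c => c.2)).zip ((b1 :: bs).zip bs), hb1, ?_, ?_⟩
  · by_cases hop : (x.1 == "function") = true
    · simp only [hop, if_true]
      simp only [segsH, cutsH_cons, hop, if_true, rbH_cons_fn i0 x rest hop, hrb, List.map_cons,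
        List.zip_cons_cons, List.cons_append, List.nil_append]
    · have hop' : (x.1 == "function") = false := by simpa using hop
      simp only [hop', Bool.false_eq_true, if_false]
      simp only [segsH, cutsH_cons, hop', Bool.false_eq_true, if_false,
        rbH_cons_eq i0 x rest hop', hrb, List.zip_cons_cons, List.cons_append, List.nil_append]
  · simp only [segsH, hrb, List.zip_cons_cons]

theorem frStepA_as_frSeg (st : PySem.Dict String (Int × Int) × String)
    (p : Int × (String × String × String × String)) :
    frStepA st p = (frSeg st.1 ((if p.2.1 == "function" then p.2.2.2.2 else st.2), p.1, p.1 + 1),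
      if p.2.1 == "function" then p.2.2.2.2 else st.2) := by
  cases hc : st.1.contains (if p.2.1 == "function" then p.2.2.2.2 else st.2) <;>
    simp only [frStepA, frSeg, hc] <;> simp [show p.1 < p.1 + 1 by omega]

theorem frSeg_merge (d : PySem.Dict String (Int × Int)) (k : String) (s e : Int) (h : s + 1 ≤ e) :
    frSeg (frSeg d (k, s, s + 1)) (k, s + 1, e) = frSeg d (k, s, e) := by
  by_cases he : s + 1 = e
  · subst he; simp [frSeg]
  · have hlt : s + 1 < e := lt_of_le_of_ne h he
    simp only [frSeg, show s < s + 1 by omega, hlt, show s < e by omega, if_true]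
    cases hc : d.contains k
    · simp only [Bool.false_eq_true, if_false]
      have hc1 : (d.insert k (s, s + 1)).contains k = true := PySem.Dict.contains_insert_self d k _
      rw [if_pos hc1, PySem.Dict.modify, PySem.Dict.getD_insert_self, PySem.Dict.insert_insert_self]
    · simp only [if_true]
      have hc1 : (d.modify k (0,0) (fun se => (se.1, s + 1))).contains k = true := by
        rw [PySem.Dict.contains_modify]; simp
      rw [if_pos hc1, PySem.Dict.modify, PySem.Dict.modify, PySem.Dict.modify,
        PySem.Dict.getD_insert_self, PySem.Dict.insert_insert_self]

theorem foldA_eq_segs (code : List (String × String × String × String)) :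
    ∀ (i0 : Int) (d : PySem.Dict String (Int × Int)) (cur : String),
      ((PySem.List.enumerate code i0).foldl frStepA (d, cur)).1 = (segsH cur i0 code).foldl frSeg d := by
  induction code with
  | nil =>
    intro i0 d cur
    simp [segsH, rbH, cutsH, PySem.List.enumerate_nil, frSeg]
  | cons x rest ih =>
    intro i0 d cur
    rw [PySem.List.enumerate_cons, List.foldl_cons, frStepA_as_frSeg]
    dsimp only
    obtain ⟨b1, tail, hb1, hfull, htail⟩ := segsH_cons cur i0 x rest
    by_cases hop : (x.1 == "function") = true
    · simp only [hop, if_true] at hfull htail ⊢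
      rw [ih (i0 + 1) _ x.2.2.2, htail, hfull]
      simp only [List.foldl_cons, List.cons_append, List.nil_append]
      rw [show frSeg d (cur, i0, i0) = d by simp [frSeg], frSeg_merge d x.2.2.2 i0 b1 hb1]
    · have hop' : (x.1 == "function") = false := by simpa using hop
      simp only [hop', Bool.false_eq_true, if_false] at hfull htail ⊢
      rw [ih (i0 + 1) _ cur, htail, hfull]
      simp only [List.foldl_cons, List.cons_append, List.nil_append]
      rw [frSeg_merge d cur i0 b1 hb1]

theorem segsH_starts_pairwise (code : List (String × String × String × String)) :
    ∀ (cur : String) (i0 : Int), ((segsH cur i0 code).map (fun q => q.2.1)).Pairwise (· ≤ ·) := by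
  induction code with
  | nil => intro cur i0; simp [segsH, rbH, cutsH, PySem.List.enumerate_nil]
  | cons x rest ih =>
    intro cur i0
    obtain ⟨b1, tail, hb1, hfull, htail⟩ := segsH_cons cur i0 x rest
    have hih := ih (if x.1 == "function" then x.2.2.2 else cur) (i0 + 1)
    rw [htail, List.map_cons, List.pairwise_cons] at hih
    obtain ⟨hall, hpw⟩ := hih
    rw [hfull, List.map_append]
    by_cases hop : (x.1 == "function") = true
    · simp only [hop, if_true, List.map_cons, List.map_nil]
      refine List.pairwise_append.2 ⟨?_, hpw, ?_⟩
      · simp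
      · intro a ha b hb
        simp at ha
        have h2 := hall b hb
        dsimp only at h2
        rcases ha with rfl | rfl <;> omega

    · simp only [hop, Bool.false_eq_true, if_false, List.map_cons, List.map_nil]
      refine List.pairwise_append.2 ⟨by simp, hpw, ?_⟩
      intro a ha b hb
      simp at ha
      have h2 := hall b hb
      dsimp only at h2
      subst ha; omega

theorem frSeg_fold_starts (segs : List (String × Int × Int)) :
    ∀ (d : PySem.Dict String (Int × Int)),
      d.keys.Nodup →
      (d.items.map (fun p => p.2.1)).Pairwise (· ≤ ·) →
      (∀ p ∈ d.items, ∀ q ∈ segs, p.2.1 ≤ q.2.1) →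
      ((segs.map (fun q => q.2.1)).Pairwise (· ≤ ·)) →
      ((segs.foldl frSeg d).items.map (fun p => p.2.1)).Pairwise (· ≤ ·) := by
  induction segs with
  | nil => intro d _ hpw _ _; simpa using hpw
  | cons q segs ih =>
    intro d hnd hpw hfut hseg
    rw [List.map_cons, List.pairwise_cons] at hseg
    obtain ⟨hq, hseg⟩ := hseg
    rw [List.foldl_cons]
    by_cases hlt : q.2.1 < q.2.2
    · by_cases hc : d.contains q.1 = true
      · -- modify: starts unchanged, keys unchanged
        have hfrs : frSeg d q = d.insert q.1 ((d.getD q.1 (0, 0)).1, q.2.2) := by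
          simp [frSeg, hlt, hc, PySem.Dict.modify]
        have hitems : (frSeg d q).items = d.items.map
            (fun p => if p.1 == q.1 then (q.1, ((d.getD q.1 (0, 0)).1, q.2.2)) else p) := by
          rw [hfrs, PySem.Dict.items_insert_of_contains _ _ hc]
        have hstarts : (frSeg d q).items.map (fun p => p.2.1) = d.items.map (fun p => p.2.1) := by
          rw [hitems, List.map_map]
          apply List.map_congr_left
          intro p hp
          by_cases hpk : (p.1 == q.1) = true
          · have hpk' : p.1 = q.1 := by exact eq_of_beq hpk
            have hmem : (q.1, p.2) ∈ d.items := by rw [← hpk']; simpa using hp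
            have := PySem.Dict.getD_of_mem_items _ hmem hnd ((0 : Int), (0 : Int))
            simp [hpk, Function.comp, this]
          · simp [hpk, Function.comp]
        have hkeys : (frSeg d q).keys = d.keys := by
          rw [hfrs, PySem.Dict.keys_insert_of_contains _ _ hc]
        apply ih
        · rw [hkeys]; exact hnd
        · rw [hstarts]; exact hpw
        · intro p hp r hr
          -- p's start equals some old item's start
          rw [hitems] at hp
          obtain ⟨p0, hp0, rfl⟩ := List.mem_map.1 hp
          by_cases hpk : (p0.1 == q.1) = true
          · have hpk' : p0.1 = q.1 := eq_of_beq hpk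
            have hmem : (q.1, p0.2) ∈ d.items := by rw [← hpk']; simpa using hp0
            have hgd := PySem.Dict.getD_of_mem_items _ hmem hnd ((0 : Int), (0 : Int))
            simp only [hpk, if_true]
            have := hfut p0 hp0 r (by simp [hr])
            simpa [hgd] using this
          · simp only [hpk, Bool.false_eq_true, if_false]
            exact hfut p0 hp0 r (by simp [hr])
        · exact hseg
      · -- fresh insert: append
        have hfrs : frSeg d q = d.insert q.1 (q.2.1, q.2.2) := by
          simp [frSeg, hlt, hc]
        have hc' : d.contains q.1 = false := by simpa using hc
        have hitems : (frSeg d q).items = d.items ++ [(q.1, (q.2.1, q.2.2))] := by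
          rw [hfrs, PySem.Dict.items_insert_of_not_contains _ _ hc']
        apply ih
        · rw [hfrs, PySem.Dict.keys_insert_of_not_contains _ _ hc']
          rw [List.nodup_append]
          refine ⟨hnd, List.nodup_singleton _, ?_⟩
          intro a ha b hb
          simp only [List.mem_singleton] at hb
          subst hb
          rintro rfl
          rw [← PySem.Dict.contains_iff_mem_keys] at ha
          simp [ha] at hc'
        · rw [hitems, List.map_append]
          refine List.pairwise_append.2 ⟨hpw, by simp, ?_⟩
          intro a ha b hb
          simp only [List.map_cons, List.map_nil, List.mem_singleton] at hb
          obtain ⟨p0, hp0, rfl⟩ := List.mem_map.1 ha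
          subst hb
          exact hfut p0 hp0 q List.mem_cons_self
        · intro p hp r hr
          rw [hitems] at hp
          rcases List.mem_append.1 hp with hp | hp
          · exact hfut p hp r (List.mem_cons_of_mem _ hr)
          · simp only [List.mem_singleton] at hp
            subst hp
            exact hq _ (List.mem_map_of_mem hr)
        · exact hseg
    · -- skipped segment
      have hfrs : frSeg d q = d := by simp [frSeg, hlt]
      rw [hfrs]
      apply ih d hnd hpw _ hseg
      intro p hp r hr
      exact hfut p hp r (List.mem_cons_of_mem _ hr)

theorem alt_eq_segs (code : List (String × String × String × String)) (asDic : Bool) :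
    function_ranges2_alt code asDic =
      ((segsH "__global__" 0 code).foldl frSeg PySem.Dict.empty).items.map (fun p => (p.1, p.2.1, p.2.2)) := by
  simp [function_ranges2_alt, segsH, rbH, cutsH]

-- ===== VERDICT (by name: the statement is the Claim_ definition above) =====
theorem function_ranges2_spec : Claim_equal_function_ranges2 := by
  intro code asDic _ hpre
  unfold Pre_function_ranges2 at hpre
  subst hpre
  unfold Spec_function_ranges2 function_ranges2
  rw [alt_eq_segs]
  show (PySem.List.sorted ((((PySem.List.enumerate code 0).foldl frStepA (PySem.Dict.empty, "__global__")).1.items.map (fun p => (p.1, p.2.1, p.2.2))) ) (fun x => x.2.1) false) = _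
  rw [foldA_eq_segs code 0 PySem.Dict.empty "__global__"]
  apply PySem.List.sorted_eq_self_of_pairwise
  rw [List.pairwise_map]
  have h := frSeg_fold_starts (segsH "__global__" 0 code) PySem.Dict.empty
    (by simp [PySem.Dict.keys_empty]) (by simp [PySem.Dict.empty])
    (by simp [PySem.Dict.empty]) (segsH_starts_pairwise code "__global__" 0)
  rw [List.pairwise_map] at h
  exact h
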